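-- pv_equiv track=rewrite | github.com/ryanwaynehenry/KOSMOS | scripts/build_relationship_candidates.py | _adjacent_cooccurrence
-- ===== SOURCE A (Python) =====
-- from typing import Any, Dict, List, Optional, Tuple
--
-- def _adjacent_cooccurrence(indices_a: List[int], indices_b: List[int]) -> Tuple[int, int]:
--     """
--     Return (count, min_distance) for overlaps where abs(diff) <= 1.
--     """
--     b_set = set(indices_b)
--     count = 0
--     min_dist = None
--     for ia in indices_a:
--         for nb in (ia - 1, ia, ia + 1):
--             if nb in b_set:
--                 count += 1
--                 dist = abs(ia - nb)
--                 min_dist = dist if min_dist is None else min(min_dist, dist)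
--     return count, (min_dist if min_dist is not None else 9999)
-- ===== SOURCE B (Python) =====
-- def _adjacent_cooccurrence(indices_a, indices_b):
--     """Same result as A: count of (ia, nb) adjacency hits and min distance (0, 1 or 9999)."""
--     bset = set(indices_b)
--     count = sum((ia - 1 in bset) + (ia in bset) + (ia + 1 in bset) for ia in indices_a)
--     if any(ia in bset for ia in indices_a):
--         min_dist = 0
--     elif count > 0:
--         min_dist = 1
--     else:
--         min_dist = 9999
--     return count, min_dist
-- ===== Notes on version B (the rewrite author's own statement) =====
-- stated objective: simpler
-- what changed: Replaces the nested loop with a running minimum by a one-line indicator-sum for the count and derives min_dist without any minimum tracking, from the fact that distances can only be 0 or 1 (0 iff some exact index match, else 1 iff any adjacency hit, else 9999).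
import Mathlib
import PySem

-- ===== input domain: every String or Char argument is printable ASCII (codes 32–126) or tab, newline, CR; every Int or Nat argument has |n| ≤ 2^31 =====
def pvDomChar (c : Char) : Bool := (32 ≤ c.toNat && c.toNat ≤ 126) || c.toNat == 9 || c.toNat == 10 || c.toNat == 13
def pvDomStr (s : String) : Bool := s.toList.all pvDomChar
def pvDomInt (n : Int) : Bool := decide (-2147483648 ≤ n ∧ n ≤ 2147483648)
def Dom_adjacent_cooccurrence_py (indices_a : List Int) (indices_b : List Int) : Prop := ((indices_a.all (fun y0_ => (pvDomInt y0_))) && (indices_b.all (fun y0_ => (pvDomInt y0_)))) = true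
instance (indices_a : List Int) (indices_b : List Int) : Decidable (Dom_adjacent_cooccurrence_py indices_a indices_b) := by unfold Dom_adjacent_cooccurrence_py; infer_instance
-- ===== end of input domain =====

-- B replaces A's nested loop with running minimum by an indicator-sum count plus a
-- derivation of min_dist from an existence check (distances are only 0 or 1): simpler.

-- ===== PORT A =====
def adjacent_cooccurrence_py (indices_a : List Int) (indices_b : List Int) : Int × Int :=
  let b_set := PySem.Set.ofList indices_b
  let st := indices_a.foldl (fun (st : Int × Option Int) ia =>
    [ia - 1, ia, ia + 1].foldl (fun (st : Int × Option Int) nb =>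
      if PySem.Set.contains b_set nb then
        (st.1 + 1, some (match st.2 with | none => |ia - nb| | some m => min m |ia - nb|))
      else st) st) (0, none)
  (st.1, st.2.getD 9999)

-- ===== PORT B =====
def adjacent_cooccurrence_py_alt (indices_a : List Int) (indices_b : List Int) : Int × Int :=
  let bset := PySem.Set.ofList indices_b
  let count : Int := (indices_a.map (fun ia =>
      (if PySem.Set.contains bset (ia - 1) then (1 : Int) else 0) +
      (if PySem.Set.contains bset ia then (1 : Int) else 0) +
      (if PySem.Set.contains bset (ia + 1) then (1 : Int) else 0))).sum
  let min_dist : Int :=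
    if indices_a.any (fun ia => PySem.Set.contains bset ia) then 0
    else if count > 0 then 1
    else 9999
  (count, min_dist)

-- ===== PRECONDITION & SPEC =====
def Spec_adjacent_cooccurrence_py (indices_a : List Int) (indices_b : List Int) (out : Int × Int) : Prop := out = adjacent_cooccurrence_py_alt indices_a indices_b
instance (indices_a : List Int) (indices_b : List Int) (out : Int × Int) : Decidable (Spec_adjacent_cooccurrence_py indices_a indices_b out) := by unfold Spec_adjacent_cooccurrence_py; infer_instance

-- ===== CLAIM (what is proved, stated in full; the proofs are below) =====
def Claim_equal_adjacent_cooccurrence_py : Prop := ∀ (indices_a : List Int) (indices_b : List Int), Dom_adjacent_cooccurrence_py indices_a indices_b → Spec_adjacent_cooccurrence_py indices_a indices_b (adjacent_cooccurrence_py indices_a indices_b)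

-- ===== LEMMAS AND PROOFS =====

/-- per-element hit count of A's inner loop (also B's indicator sum summand) -/
def pvCnt1 (s : List Int) (ia : Int) : Int :=
  (if PySem.Set.contains s (ia - 1) then (1 : Int) else 0) +
  (if PySem.Set.contains s ia then (1 : Int) else 0) +
  (if PySem.Set.contains s (ia + 1) then (1 : Int) else 0)

def pvCntL (s : List Int) (a : List Int) : Int := (a.map (pvCnt1 s)).sum

/-- min distance contributed by one element of indices_a -/
def pvBest1 (s : List Int) (ia : Int) : Option Int :=
  if PySem.Set.contains s ia then some 0
  else if PySem.Set.contains s (ia - 1) || PySem.Set.contains s (ia + 1) then some 1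
  else none

/-- min over optional values, `none` = no hit yet -/
def pvOmin : Option Int → Option Int → Option Int
  | none, y => y
  | some x, none => some x
  | some x, some y => some (min x y)

def pvBestL (s : List Int) : List Int → Option Int
  | [] => none
  | x :: xs => pvOmin (pvBest1 s x) (pvBestL s xs)

lemma pvOmin_none_right (m : Option Int) : pvOmin m none = m := by
  cases m <;> rfl

lemma pvOmin_assoc (x y z : Option Int) : pvOmin (pvOmin x y) z = pvOmin x (pvOmin y z) := by
  cases x <;> cases y <;> cases z <;> simp [pvOmin, min_assoc]

lemma pvCntL_nonneg (s a : List Int) : 0 ≤ pvCntL s a := by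
  induction a with
  | nil => simp [pvCntL]
  | cons x xs ih =>
    simp only [pvCntL, List.map_cons, List.sum_cons] at *
    have : 0 ≤ pvCnt1 s x := by unfold pvCnt1; split_ifs <;> omega
    omega

lemma inner_step (s : List Int) (ia c : Int) (m : Option Int) :
    [ia - 1, ia, ia + 1].foldl (fun (st : Int × Option Int) nb =>
      if PySem.Set.contains s nb then
        (st.1 + 1, some (match st.2 with | none => |ia - nb| | some m => min m |ia - nb|))
      else st) (c, m)
    = (c + pvCnt1 s ia, pvOmin m (pvBest1 s ia)) := by
  cases m <;>
    by_cases h1 : (ia - 1) ∈ s <;>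
    by_cases h2 : ia ∈ s <;>
    by_cases h3 : (ia + 1) ∈ s <;>
      simp [List.foldl, pvCnt1, pvBest1, pvOmin, h1, h2, h3] <;> omega

lemma outer_fold (s a : List Int) : ∀ (c : Int) (m : Option Int),
    a.foldl (fun (st : Int × Option Int) ia =>
      [ia - 1, ia, ia + 1].foldl (fun (st : Int × Option Int) nb =>
        if PySem.Set.contains s nb then
          (st.1 + 1, some (match st.2 with | none => |ia - nb| | some m => min m |ia - nb|))
        else st) st) (c, m)
    = (c + pvCntL s a, pvOmin m (pvBestL s a)) := by
  induction a with
  | nil => intro c m; simp [pvCntL, pvBestL, pvOmin_none_right]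
  | cons x xs ih =>
    intro c m
    rw [List.foldl_cons, inner_step, ih]
    simp only [pvCntL, pvBestL, List.map_cons, List.sum_cons, pvOmin_assoc,
      Prod.mk.injEq]
    exact ⟨by omega, trivial⟩

lemma bestL_char (s a : List Int) :
    pvBestL s a = if a.any (fun ia => PySem.Set.contains s ia) then some 0
      else if pvCntL s a > 0 then some 1 else none := by
  induction a with
  | nil => simp [pvBestL, pvCntL]
  | cons x xs ih =>
    have hxs : 0 ≤ (xs.map (pvCnt1 s)).sum := by
      simpa [pvCntL] using pvCntL_nonneg s xs
    simp only [pvBestL, ih, List.any_cons, pvCntL, List.map_cons, List.sum_cons]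
    by_cases h1 : (x - 1) ∈ s <;>
    by_cases h2 : x ∈ s <;>
    by_cases h3 : (x + 1) ∈ s <;>
      simp [pvBest1, pvCnt1, h1, h2, h3, pvOmin] <;>
      split_ifs <;> first | rfl | omega

-- ===== VERDICT (by name: the statement is the Claim_ definition above) =====
theorem adjacent_cooccurrence_py_spec : Claim_equal_adjacent_cooccurrence_py := by
  intro a b _
  unfold Spec_adjacent_cooccurrence_py adjacent_cooccurrence_py adjacent_cooccurrence_py_alt
  simp only [outer_fold (PySem.Set.ofList b) a 0 none, bestL_char]
  have hc : (a.map (fun ia =>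
      (if PySem.Set.contains (PySem.Set.ofList b) (ia - 1) then (1 : Int) else 0) +
      (if PySem.Set.contains (PySem.Set.ofList b) ia then (1 : Int) else 0) +
      (if PySem.Set.contains (PySem.Set.ofList b) (ia + 1) then (1 : Int) else 0))).sum
      = pvCntL (PySem.Set.ofList b) a := rfl
  simp only [hc, pvOmin, zero_add]
  split_ifs <;> simp [Option.getD]
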